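-- pv_equiv track=rewrite | github.com/Karimk94/EDMS-API | services/processor.py | determine_security_from_groups
-- ===== SOURCE A (Python) =====
-- def determine_security_from_groups(user_groups):
--     """
--     Determines security level based on DMS group membership.
--     Returns: 9 (Admin), 5 (Editor), or 0 (Viewer)
--     """
--     if not user_groups:
--         return 0
--
--     group_ids = [g.get('group_id', '').upper() for g in user_groups]
--
--     # Define your organization's security groups
--     ADMIN_GROUPS = {
--         'DOCS_ADMINS',
--         'DOCS_SUPERVISORS',
--         'ADMINISTRATOR',
--         'ADMIN',
--         'SYSADMIN',
--         # Add more admin groups here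
--     }
--
--     EDITOR_GROUPS = {
--         'DOCS_EDITORS',
--         'DOCS_USERS',
--         'TIBCO_GROUP',
--         'CONTRIBUTORS',
--         'POWER_USERS'
--     }
--
--     # Check for admin privileges
--     for group_id in group_ids:
--         if group_id in ADMIN_GROUPS:
--             return 9
--
--     # Check for editor privileges
--     for group_id in group_ids:
--         if group_id in EDITOR_GROUPS:
--             return 5
--
--     # Default to viewer
--     return 0
-- ===== SOURCE B (Python) =====
-- ADMIN_GROUPS = {'DOCS_ADMINS', 'DOCS_SUPERVISORS', 'ADMINISTRATOR', 'ADMIN', 'SYSADMIN'}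
-- EDITOR_GROUPS = {'DOCS_EDITORS', 'DOCS_USERS', 'TIBCO_GROUP', 'CONTRIBUTORS', 'POWER_USERS'}
--
-- def determine_security_from_groups(user_groups):
--     """Single pass: return 9 on the first admin match; otherwise remember
--     whether any editor group was seen and decide 5/0 after the scan."""
--     editor_found = False
--     for g in user_groups:
--         gid = g.get('group_id', '').upper()
--         if gid in ADMIN_GROUPS:
--             return 9
--         if gid in EDITOR_GROUPS:
--             editor_found = True
--     return 5 if editor_found else 0
-- ===== Notes on version B (the rewrite author's own statement) =====
-- stated objective: simpler
-- what changed: Replaced the build-a-list-of-ids step plus two sequential full scans (admins, then editors) by a single pass that returns 9 on the first admin match and carries one editor_found boolean, deciding 5/0 after the scan; the empty-list guard disappears.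
import Mathlib
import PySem

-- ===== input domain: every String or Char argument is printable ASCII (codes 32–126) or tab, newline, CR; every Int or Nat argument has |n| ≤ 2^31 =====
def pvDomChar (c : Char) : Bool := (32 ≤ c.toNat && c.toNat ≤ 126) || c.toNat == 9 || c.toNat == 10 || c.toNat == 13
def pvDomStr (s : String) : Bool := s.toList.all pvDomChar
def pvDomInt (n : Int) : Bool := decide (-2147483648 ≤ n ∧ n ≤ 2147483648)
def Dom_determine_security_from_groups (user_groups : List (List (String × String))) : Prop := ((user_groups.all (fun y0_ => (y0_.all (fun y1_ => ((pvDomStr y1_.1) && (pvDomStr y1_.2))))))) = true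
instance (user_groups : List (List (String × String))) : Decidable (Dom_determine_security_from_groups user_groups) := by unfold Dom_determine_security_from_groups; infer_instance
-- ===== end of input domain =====

-- B replaces A's id-list construction plus two sequential scans by one pass with an
-- editor_found flag (objective: simpler); admin priority is kept by early-returning 9.

-- ===== PORT A =====
def pvAdminGroups : List String :=
  ["DOCS_ADMINS", "DOCS_SUPERVISORS", "ADMINISTRATOR", "ADMIN", "SYSADMIN"]

def pvEditorGroups : List String :=
  ["DOCS_EDITORS", "DOCS_USERS", "TIBCO_GROUP", "CONTRIBUTORS", "POWER_USERS"]

-- g.get('group_id', '').upper()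
def pvGid (g : List (String × String)) : String :=
  PySem.Str.upper ((PySem.Dict.mk g).getD "group_id" "")

-- 'for group_id in group_ids: if group_id in ADMIN_GROUPS: return 9'
def pvAdminLoop (ids : List String) : Option Int :=
  match ids with
  | [] => none
  | i :: rest => if pvAdminGroups.contains i then some 9 else pvAdminLoop rest

-- 'for group_id in group_ids: if group_id in EDITOR_GROUPS: return 5'
def pvEditorLoop (ids : List String) : Option Int :=
  match ids with
  | [] => none
  | i :: rest => if pvEditorGroups.contains i then some 5 else pvEditorLoop rest

def determine_security_from_groups (user_groups : List (List (String × String))) : Int :=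
  if user_groups = [] then 0
  else
    let group_ids := user_groups.map pvGid
    match pvAdminLoop group_ids with
    | some r => r
    | none =>
      match pvEditorLoop group_ids with
      | some r => r
      | none => 0

-- ===== PORT B =====
-- single pass: first admin match returns 9; editor matches only set a flag
def pvAltLoop (gs : List (List (String × String))) (editor_found : Bool) : Int :=
  match gs with
  | [] => if editor_found then 5 else 0
  | g :: rest =>
    let gid := pvGid g
    if pvAdminGroups.contains gid then 9
    else pvAltLoop rest (if pvEditorGroups.contains gid then true else editor_found)

def determine_security_from_groups_alt (user_groups : List (List (String × String))) : Int :=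
  pvAltLoop user_groups false

-- ===== PRECONDITION & SPEC =====
def Spec_determine_security_from_groups (user_groups : List (List (String × String))) (out : Int) : Prop := out = determine_security_from_groups_alt user_groups
instance (user_groups : List (List (String × String))) (out : Int) : Decidable (Spec_determine_security_from_groups user_groups out) := by unfold Spec_determine_security_from_groups; infer_instance

-- ===== CLAIM (what is proved, stated in full; the proofs are below) =====
def Claim_equal_determine_security_from_groups : Prop := ∀ (user_groups : List (List (String × String))), Dom_determine_security_from_groups user_groups → Spec_determine_security_from_groups user_groups (determine_security_from_groups user_groups)

-- ===== LEMMAS AND PROOFS =====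
lemma pv_ite_or {α : Type} {P Q : Prop} [Decidable P] [Decidable Q] (a b : α) :
    (if P then a else if Q then a else b) = (if P ∨ Q then a else b) := by
  by_cases hP : P <;> by_cases hQ : Q <;> simp [hP, hQ]

lemma pvAdminLoop_eq (ids : List String) :
    pvAdminLoop ids = if ids.any pvAdminGroups.contains then some 9 else none := by
  induction ids with
  | nil => rfl
  | cons i rest ih => by_cases h : pvAdminGroups.contains i <;> simp [pvAdminLoop, h, ih, pv_ite_or]

lemma pvEditorLoop_eq (ids : List String) :
    pvEditorLoop ids = if ids.any pvEditorGroups.contains then some 5 else none := by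
  induction ids with
  | nil => rfl
  | cons i rest ih => by_cases h : pvEditorGroups.contains i <;> simp [pvEditorLoop, h, ih, pv_ite_or]

lemma pvAltLoop_eq (gs : List (List (String × String))) (ef : Bool) :
    pvAltLoop gs ef =
      if (gs.map pvGid).any pvAdminGroups.contains then 9
      else if ef || (gs.map pvGid).any pvEditorGroups.contains then 5 else 0 := by
  induction gs generalizing ef with
  | nil => cases ef <;> rfl
  | cons g rest ih =>
    cases ha : pvAdminGroups.contains (pvGid g) <;>
      cases he : pvEditorGroups.contains (pvGid g) <;>
        cases ef <;> simp [pvAltLoop, ha, he, ih, pv_ite_or]  -- ha/he pick the branch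

-- ===== VERDICT (by name: the statement is the Claim_ definition above) =====
theorem determine_security_from_groups_spec : Claim_equal_determine_security_from_groups := by
  intro ug _
  unfold Spec_determine_security_from_groups determine_security_from_groups determine_security_from_groups_alt
  rcases ug with _ | ⟨g, rest⟩
  · rfl
  · simp only [pvAdminLoop_eq, pvEditorLoop_eq, pvAltLoop_eq, if_neg (List.cons_ne_nil g rest),
      Bool.false_or]
    split_ifs <;> simp_all
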